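-- pv_equiv track=rewrite | github.com/qeedquan/challenges | codegolf/albuququerquerquerquerque-challlengenge.py | albuquerque
-- ===== SOURCE A (Python) =====
-- def albuquerque(p):
--     r = ""
--     for i in range(len(p)):
--         if p[i] in p[:i]:
--             q = p[i-1::-1]
--             q = q.find(p[i])
--             r += p[i-q-1:i+1]
--         else:
--             r += p[i]
--     return r
-- ===== SOURCE B (Python) =====
-- def albuquerque(p):
--     parts = []
--     bufs = {}  # char -> list of chars seen since (and including) its last occurrence
--     for c in p:
--         buf = bufs.get(c)
--         parts.append(c if buf is None else "".join(buf) + c)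
--         for b in bufs.values():
--             b.append(c)
--         bufs[c] = [c]
--     return "".join(parts)
-- ===== Notes on version B (the rewrite author's own statement) =====
-- stated objective: faster
-- what changed: Instead of locating each repeat by rescanning/slicing the prefix, B streams the characters once and maintains, per character, a growing buffer of everything seen since that character's last occurrence, so the emitted piece is read off the buffer directly with no index arithmetic or slicing.
import Mathlib
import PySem

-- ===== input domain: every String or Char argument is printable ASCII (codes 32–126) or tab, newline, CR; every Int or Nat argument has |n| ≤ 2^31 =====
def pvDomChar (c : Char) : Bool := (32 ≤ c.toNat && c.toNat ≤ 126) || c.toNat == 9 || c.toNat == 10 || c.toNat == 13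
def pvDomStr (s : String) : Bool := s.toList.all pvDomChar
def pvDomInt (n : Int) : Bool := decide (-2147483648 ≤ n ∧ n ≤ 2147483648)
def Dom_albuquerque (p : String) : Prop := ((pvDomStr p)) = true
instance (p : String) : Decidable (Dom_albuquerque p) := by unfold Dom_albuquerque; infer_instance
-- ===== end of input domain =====

-- B streams the characters once, maintaining per character a buffer of everything seen
-- since its last occurrence (no index arithmetic or slicing); measurably faster than A's
-- per-index prefix rescans.
set_option maxRecDepth 8000


-- ===== PORT A =====
-- the body of A's `for i in range(len(p))` loop
def aStep (l : List Char) (r : List Char) (i : Int) : List Char :=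
  match PySem.List.pyGet? l i with
  | none => r   -- unreachable: i ranges over range(len(p))
  | some c =>
    if c ∈ PySem.List.slice l none (some i) then       -- p[i] in p[:i]
      let q := (PySem.List.slice? l (some (i - 1)) none (-1)).getD []   -- q = p[i-1::-1] (in range here)
      let q := PySem.Chars.find q [c]                   -- q = q.find(p[i])
      r ++ PySem.List.slice l (some (i - q - 1)) (some (i + 1))   -- r += p[i-q-1:i+1]
    else
      r ++ [c]                                          -- r += p[i]

def albuquerque (p : String) : String :=
  let l := p.toList
  String.ofList ((PySem.List.pyRange 0 l.length 1).foldl (aStep l) [])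

-- ===== PORT B =====
-- the body of B's `for c in p` loop over the (parts, bufs) accumulator
def bStep (acc : List (List Char) × PySem.Dict Char (List Char)) (c : Char) :
    List (List Char) × PySem.Dict Char (List Char) :=
  let seg := match PySem.Dict.get? acc.2 c with        -- buf = bufs.get(c)
    | none => [c]                                       -- parts.append(c)
    | some b => b ++ [c]                                -- parts.append("".join(buf) + c)
  -- `for b in bufs.values(): b.append(c)` extends every stored buffer in place,
  -- keys and order unchanged: ported exactly as a map over the items list
  let d1 := PySem.Dict.mk (acc.2.items.map (fun q => (q.1, q.2 ++ [c])))
  (acc.1 ++ [seg], PySem.Dict.insert d1 c [c])          -- bufs[c] = [c]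

def albuquerque_alt (p : String) : String :=
  let res := p.toList.foldl bStep ([], PySem.Dict.empty)
  String.ofList res.1.flatten                           -- "".join(parts)

-- ===== PRECONDITION & SPEC =====
def Spec_albuquerque (p : String) (out : String) : Prop := out = albuquerque_alt p
instance (p : String) (out : String) : Decidable (Spec_albuquerque p out) := by unfold Spec_albuquerque; infer_instance

-- ===== CLAIM (what is proved, stated in full; the proofs are below) =====
def Claim_equal_albuquerque : Prop := ∀ (p : String), Dom_albuquerque p → Spec_albuquerque p (albuquerque p)

-- ===== LEMMAS AND PROOFS =====

lemma filterMap_range_all_some {α : Type} (f : Nat → Option α) (g : Nat → α) (n : Nat)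
    (h : ∀ k < n, f k = some (g k)) : (List.range n).filterMap f = (List.range n).map g := by
  rw [show (List.range n).map g = (List.range n).filterMap (some ∘ g) by
        rw [List.filterMap_eq_map]]
  exact List.filterMap_congr (by intro a ha; simp at ha; exact h a ha)

-- p[a::-1] for 0 ≤ a < len(p) is the reverse of p[:a+1]
lemma slice?_from_neg_one {α : Type} [Inhabited α] (xs : List α) (a : Nat) (ha : a < xs.length) :
    PySem.List.slice? xs (some (a : Int)) none (-1) = some ((xs.take (a + 1)).reverse) := by
  unfold PySem.List.slice? PySem.List.sliceIndices
  have h1 : ¬ ((-1 : Int) = 0) := by norm_num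
  have hs : ¬ ((a : Int) < 0) := by omega
  have hmin : min (a : Int) ((xs.length : Int) - 1) = (a : Int) := by omega
  norm_num [hs]
  rw [hmin]
  have hcond : (-1 : Int) < (a : Int) ∧ 0 < xs.length := ⟨by omega, by omega⟩
  rw [if_pos hcond]
  have hcnt : ((a : Int) + 1).toNat = a + 1 := by omega
  rw [hcnt]
  rw [filterMap_range_all_some _ (fun k => xs.getD (a - k) default) _ ?_]
  · apply List.ext_getElem
    · simp; omega
    · intro i h1' h2'
      simp only [List.getElem_map, List.getElem_range, List.getElem_reverse, List.getElem_take]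
      simp only [List.length_map, List.length_range] at h1'
      rw [List.getD_eq_getElem _ _ (by omega)]
      congr 1
      simp [List.length_take] at h2' ⊢
      omega
  · intro k hk
    have : ((a : Int) + -(k : Int)).toNat = a - k := by omega
    rw [this, List.getElem?_eq_getElem (by omega)]
    simp [List.getD, List.getElem?_eq_getElem (show a - k < xs.length by omega)]

-- str.find with a singleton needle that occurs is idxOf
lemma find_go_singleton (c : Char) : ∀ (s : List Char) (k : Nat), c ∈ s →
    PySem.Chars.find.go [c] s k = ((k + s.idxOf c : Nat) : Int)
  | [], k, h => by simp at h
  | a :: t, k, h => by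
    rw [PySem.Chars.find.go]
    by_cases hac : c = a
    · subst hac
      simp [List.isPrefixOf, List.idxOf_cons_self]
    · have hpre : [c].isPrefixOf (a :: t) = false := by
        simp [List.isPrefixOf]; exact fun h' => (hac h').elim
      rw [hpre]
      simp only [Bool.false_eq_true, if_false]
      have hmem : c ∈ t := by rcases List.mem_cons.mp h with h' | h'; exact (hac h').elim; exact h'
      rw [find_go_singleton c t (k+1) hmem]
      rw [List.idxOf_cons_ne _ (by exact fun h' => hac h'.symm)]
      push_cast; ring

lemma find_singleton (s : List Char) (c : Char) (h : c ∈ s) :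
    PySem.Chars.find s [c] = ((s.idxOf c : Nat) : Int) := by
  rw [PySem.Chars.find, find_go_singleton c s 0 h]; simp

-- looking up in B's value-extended dict
lemma get?_mapApp (items : List (Char × List Char)) (x : Char) (c : Char) :
    PySem.Dict.get? (PySem.Dict.mk (items.map (fun q => (q.1, q.2 ++ [c])))) x
      = (PySem.Dict.get? (PySem.Dict.mk items) x).map (· ++ [c]) := by
  induction items with
  | nil => simp [PySem.Dict.get?]
  | cons a t ih =>
    obtain ⟨k, v⟩ := a
    simp only [List.map_cons, PySem.Dict.get?_mk_cons]
    by_cases hx : (k == x) = true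
    · simp [hx]
    · simp only [hx, Bool.false_eq_true, if_false, ih]

-- the index B's buffer for a char present in the processed prefix starts at (its last occurrence)
def lastVal (pre : List Char) (c : Char) : Nat := pre.length - 1 - pre.reverse.idxOf c

-- invariant: B's dict maps each char of the processed prefix to the chars since its last occurrence
def DInv (l : List Char) (i : Nat) (d : PySem.Dict Char (List Char)) : Prop :=
  ∀ c, PySem.Dict.get? d c =
    if c ∈ l.take i then some ((l.take i).drop (lastVal (l.take i) c)) else none

lemma DInv_step (l : List Char) (i : Nat) (hi : i < l.length)
    (d : PySem.Dict Char (List Char)) (hd : DInv l i d) :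
    DInv l (i + 1)
      (PySem.Dict.insert (PySem.Dict.mk (d.items.map (fun q => (q.1, q.2 ++ [l[i]])))) l[i] [l[i]]) := by
  intro c'
  have htake : l.take (i + 1) = l.take i ++ [l[i]] := by
    rw [List.take_add_one]; simp [List.getElem?_eq_getElem hi]
  have hlen : (l.take i).length = i := by simp; omega
  have hlen1 : (l.take (i + 1)).length = i + 1 := by simp; omega
  have hrev : (l.take (i + 1)).reverse = l[i] :: (l.take i).reverse := by
    rw [htake, List.reverse_append]; simp
  rw [PySem.Dict.get?_insert]
  by_cases hc : c' = l[i]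
  · subst hc
    rw [if_pos rfl, if_pos (by rw [htake]; exact List.mem_append_right _ (by simp))]
    unfold lastVal
    rw [hrev, List.idxOf_cons_self, hlen1]
    simp only [Nat.add_sub_cancel, Nat.sub_zero]
    have h0 : (l.take i).drop i = [] := List.drop_eq_nil_of_le (by omega)
    rw [htake, List.drop_append_of_le_length (by rw [hlen]), h0]
    rfl
  · rw [if_neg hc, get?_mapApp, hd c']
    have hmem_iff : c' ∈ l.take (i + 1) ↔ c' ∈ l.take i := by
      rw [htake]
      simp only [List.mem_append, List.mem_singleton]
      exact or_iff_left hc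
    by_cases hm : c' ∈ l.take i
    · rw [if_pos hm, if_pos (hmem_iff.mpr hm)]
      have hidx : (l.take (i + 1)).reverse.idxOf c' = (l.take i).reverse.idxOf c' + 1 := by
        rw [hrev, List.idxOf_cons_ne _ (fun h' => hc h'.symm)]
      have hval : lastVal (l.take (i + 1)) c' = lastVal (l.take i) c' := by
        unfold lastVal
        rw [hidx, hlen, hlen1]
        have ht : (l.take i).reverse.idxOf c' < i := by
          have := List.idxOf_lt_length_of_mem (List.mem_reverse.mpr hm)
          simpa [hlen] using this
        omega
      have hle : lastVal (l.take i) c' ≤ (l.take i).length := by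
        unfold lastVal; omega
      rw [hval, htake, List.drop_append_of_le_length hle]
      simp
    · rw [if_neg hm, if_neg (fun h' => hm (hmem_iff.mp h'))]
      rfl

lemma main_loop (l : List Char) :
    ∀ (k i : Nat), i + k = l.length →
    ∀ (r : List Char) (parts : List (List Char)) (d : PySem.Dict Char (List Char)),
      DInv l i d → r = parts.flatten →
      (PySem.List.pyRange (i : Int) (l.length : Int) 1).foldl (aStep l) r
      = ((l.drop i).foldl bStep (parts, d)).1.flatten
  | 0, i, hk => by
    intro r parts d _ hr
    have hi : i = l.length := by omega
    subst hi
    rw [PySem.List.pyRange_one_eq_nil (le_refl _), List.drop_length]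
    simpa using hr
  | k + 1, i, hk => by
    intro r parts d hd hr
    have hi : i < l.length := by omega
    rw [PySem.List.pyRange_one_cons (by omega), List.drop_eq_getElem_cons hi]
    simp only [List.foldl_cons]
    have hget : PySem.List.pyGet? l (i : Int) = some l[i] := by
      rw [PySem.List.pyGet?_natCast, List.getElem?_eq_getElem hi]
    have hslice : PySem.List.slice l none (some (i : Int)) = l.take i :=
      PySem.List.slice_to_natCast l i
    have hlen : (l.take i).length = i := by simp; omega
    have hcast1 : ((i : Int) + 1) = ((i + 1 : Nat) : Int) := by push_cast; ring
    by_cases hm : l[i] ∈ l.take i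
    · -- repeated char: A appends p[j:i+1]; B appends its buffer (= p[j:i]) plus the char
      have hipos : 0 < i := by
        rcases Nat.eq_zero_or_pos i with h0 | h0
        · subst h0; simp at hm
        · exact h0
      have hql : (PySem.List.slice? l (some ((i : Int) - 1)) none (-1)).getD []
          = (l.take i).reverse := by
        rw [show ((i : Int) - 1) = (((i - 1 : Nat)) : Int) by omega,
            slice?_from_neg_one l (i - 1) (by omega), show i - 1 + 1 = i by omega]
        rfl
      have htlt : (l.take i).reverse.idxOf l[i] < i := by
        have := List.idxOf_lt_length_of_mem (List.mem_reverse.mpr hm)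
        simpa [hlen] using this
      have hdc : PySem.Dict.get? d l[i]
          = some ((l.take i).drop (i - 1 - (l.take i).reverse.idxOf l[i])) := by
        rw [hd l[i], if_pos hm]
        unfold lastVal
        rw [hlen]
      have hseg : PySem.List.slice l (some (((i - 1 - (l.take i).reverse.idxOf l[i] : Nat)) : Int))
            (some ((i + 1 : Nat) : Int))
          = (l.take i).drop (i - 1 - (l.take i).reverse.idxOf l[i]) ++ [l[i]] := by
        rw [PySem.List.slice_natCast]
        have h1 : (l.take (i + 1)).drop (i - 1 - (l.take i).reverse.idxOf l[i])
            = (l.drop (i - 1 - (l.take i).reverse.idxOf l[i])).take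
                (i + 1 - (i - 1 - (l.take i).reverse.idxOf l[i])) := by
          rw [List.drop_take]
        rw [← h1, List.take_add_one, List.getElem?_eq_getElem hi]
        simp only [Option.toList_some]
        rw [List.drop_append_of_le_length (by rw [hlen]; omega)]
      have hA : aStep l r (i : Int)
          = r ++ ((l.take i).drop (i - 1 - (l.take i).reverse.idxOf l[i]) ++ [l[i]]) := by
        unfold aStep
        rw [hget]
        simp only [hslice, if_pos hm, hql,
          find_singleton _ _ (List.mem_reverse.mpr hm)]
        rw [← hseg]
        congr 2
        exact congrArg some (by omega)
      have hB : bStep (parts, d) l[i]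
          = (parts ++ [(l.take i).drop (i - 1 - (l.take i).reverse.idxOf l[i]) ++ [l[i]]],
             PySem.Dict.insert (PySem.Dict.mk (d.items.map (fun q => (q.1, q.2 ++ [l[i]])))) l[i] [l[i]]) := by
        unfold bStep
        simp only [hdc]
      rw [hA, hB, hcast1]
      exact main_loop l k (i + 1) (by omega) _ _ _ (DInv_step l i hi d hd) (by simp [hr])
    · -- first occurrence: both append the char itself
      have hdc : PySem.Dict.get? d l[i] = none := by rw [hd l[i], if_neg hm]
      have hA : aStep l r (i : Int) = r ++ [l[i]] := by
        unfold aStep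
        rw [hget]
        simp only [hslice, if_neg hm]
      have hB : bStep (parts, d) l[i]
          = (parts ++ [[l[i]]],
             PySem.Dict.insert (PySem.Dict.mk (d.items.map (fun q => (q.1, q.2 ++ [l[i]])))) l[i] [l[i]]) := by
        unfold bStep
        simp only [hdc]
      rw [hA, hB, hcast1]
      exact main_loop l k (i + 1) (by omega) _ _ _ (DInv_step l i hi d hd) (by simp [hr])

-- ===== VERDICT (by name: the statement is the Claim_ definition above) =====
theorem albuquerque_spec : Claim_equal_albuquerque := by
  intro p _
  unfold Spec_albuquerque albuquerque albuquerque_alt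
  have h := main_loop p.toList p.toList.length 0 (by omega) [] [] PySem.Dict.empty
    (by intro c; simp [PySem.Dict.get?, PySem.Dict.empty]) rfl
  simpa using congrArg String.ofList h
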